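-- pv_equiv track=rewrite | github.com/Sheactyson/wizmatic | src/state/participants.py | _build_prefix_maps
-- ===== SOURCE A (Python) =====
-- from typing import Dict, Optional, Tuple, List, Set
--
-- def _build_prefix_maps(norms_ns: List[str], max_len: int) -> Dict[int, Dict[str, List[int]]]:
--     maps: Dict[int, Dict[str, List[int]]] = {length: {} for length in range(1, max_len + 1)}
--     for i, norm_ns in enumerate(norms_ns):
--         if not norm_ns:
--             continue
--         for length in range(1, max_len + 1):
--             if len(norm_ns) < length:
--                 break
--             key = norm_ns[:length]
--             bucket = maps[length].get(key)
--             if bucket is None: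
--                 maps[length][key] = [i]
--             else:
--                 bucket.append(i)
--     return maps
-- ===== SOURCE B (Python) =====
-- def _build_prefix_maps(norms_ns, max_len):
--     # Transposed traversal: one pass over the (still long enough) strings per
--     # prefix length; the candidate list shrinks as the length grows, so strings
--     # are never revisited past their own length.
--     maps = {}
--     alive = list(enumerate(norms_ns))
--     for length in range(1, max_len + 1):
--         alive = [(i, s) for (i, s) in alive if length <= len(s)]
--         bucket = {}
--         for i, s in alive:
--             bucket.setdefault(s[:length], []).append(i)
--         maps[length] = bucket
--     return maps
-- ===== Notes on version B (the rewrite author's own statement) =====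
-- stated objective: alternative
-- what changed: B transposes the loop nest: instead of walking every string and re-scanning lengths 1..max_len with a break and a pre-initialised dict of empty buckets, it makes one independent pass over the strings per prefix length, building each length's bucket from scratch with setdefault.
import Mathlib
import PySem

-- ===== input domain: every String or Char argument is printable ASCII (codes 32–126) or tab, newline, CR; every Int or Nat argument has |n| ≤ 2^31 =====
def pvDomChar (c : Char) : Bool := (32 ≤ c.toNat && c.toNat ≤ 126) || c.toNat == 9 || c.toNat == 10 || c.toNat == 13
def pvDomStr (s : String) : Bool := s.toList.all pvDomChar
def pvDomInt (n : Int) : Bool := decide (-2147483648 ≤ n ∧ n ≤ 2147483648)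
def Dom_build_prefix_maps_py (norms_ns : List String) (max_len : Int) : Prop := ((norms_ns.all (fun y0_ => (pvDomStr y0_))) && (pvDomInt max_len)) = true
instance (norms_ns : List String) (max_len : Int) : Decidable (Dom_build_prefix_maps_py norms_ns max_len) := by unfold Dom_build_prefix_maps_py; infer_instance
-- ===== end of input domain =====

-- B transposes the two loops: one independent pass over the strings per prefix length
-- (no break, no pre-initialised outer dict); same cost, no mutation of the arguments.

-- ===== PORT A =====
-- inner 'for length in range(...)' loop with its break; maps[length] is always
-- present here (length comes from the same range that initialised maps), so the
-- KeyError-free lookup maps[length] is ported as getD with an empty-dict default.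
def pvInnerA (i : Int) (s : String) :
    List Int → PySem.Dict Int (PySem.Dict String (List Int)) → PySem.Dict Int (PySem.Dict String (List Int))
  | [], maps => maps
  | L :: rest, maps =>
    if PySem.Str.len s < L then maps          -- break
    else
      let key := PySem.Str.slice s none (some L)
      let m := maps.getD L PySem.Dict.empty   -- maps[length]
      let m' := match m.get? key with         -- bucket = maps[length].get(key)
        | none => m.insert key [i]            -- maps[length][key] = [i]
        | some b => m.insert key (b ++ [i])   -- bucket.append(i)  (in place: position kept)
      pvInnerA i s rest (maps.insert L m')

def build_prefix_maps_py (norms_ns : List String) (max_len : Int) : List (Int × List (String × List Int)) :=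
  let maps0 := (PySem.List.pyRange 1 (max_len + 1)).foldl
      (fun d length => d.insert length (PySem.Dict.empty : PySem.Dict String (List Int)))
      PySem.Dict.empty
  let maps := (PySem.List.enumerate norms_ns 0).foldl
      (fun maps p => if p.2 = "" then maps
                     else pvInnerA p.1 p.2 (PySem.List.pyRange 1 (max_len + 1)) maps)
      maps0
  maps.items.map (fun q => (q.1, q.2.items))

-- ===== PORT B =====
-- bucket.setdefault(key, []).append(i) = bucket[key] = bucket.get(key, []) + [i], i.e. Dict.modify;
-- the loop state is (alive, maps-so-far); maps[length] = bucket appends a fresh key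
def build_prefix_maps_py_alt (norms_ns : List String) (max_len : Int) : List (Int × List (String × List Int)) :=
  ((PySem.List.pyRange 1 (max_len + 1)).foldl
    (fun st length =>
      let alive := st.1.filter (fun p => decide (length ≤ PySem.Str.len p.2))
      let bucket := alive.foldl
        (fun bucket p => bucket.modify (PySem.Str.slice p.2 none (some length)) [] (· ++ [p.1]))
        (PySem.Dict.empty : PySem.Dict String (List Int))
      (alive, st.2 ++ [(length, bucket.items)]))
    (PySem.List.enumerate norms_ns 0, ([] : List (Int × List (String × List Int))))).2

-- ===== PRECONDITION & SPEC =====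
def Spec_build_prefix_maps_py (norms_ns : List String) (max_len : Int) (out : List (Int × List (String × List Int))) : Prop := out = build_prefix_maps_py_alt norms_ns max_len
instance (norms_ns : List String) (max_len : Int) (out : List (Int × List (String × List Int))) : Decidable (Spec_build_prefix_maps_py norms_ns max_len out) := by unfold Spec_build_prefix_maps_py; infer_instance

-- ===== CLAIM (what is proved, stated in full; the proofs are below) =====
def Claim_equal_build_prefix_maps_py : Prop := ∀ (norms_ns : List String) (max_len : Int), Dom_build_prefix_maps_py norms_ns max_len → Spec_build_prefix_maps_py norms_ns max_len (build_prefix_maps_py norms_ns max_len)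

-- ===== LEMMAS AND PROOFS =====

-- the effect of one (index, string) pair on the length-L bucket (B's loop body)
def pvStep (L : Int) (bucket : PySem.Dict String (List Int)) (p : Int × String) : PySem.Dict String (List Int) :=
  if L ≤ PySem.Str.len p.2 then
    bucket.modify (PySem.Str.slice p.2 none (some L)) [] (· ++ [p.1])
  else bucket

-- B's loop: once the alive list is (extensionally) a filter of es, each round
-- produces the same bucket as folding pvStep over all of es
lemma pv_alt_loop (es : List (Int × String)) :
    ∀ (Ls : List Int), Ls.Pairwise (· ≤ ·) →
    ∀ (alive : List (Int × String)) (acc : List (Int × List (String × List Int))),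
    (∀ L ∈ Ls, alive.filter (fun p => decide (L ≤ PySem.Str.len p.2))
        = es.filter (fun p => decide (L ≤ PySem.Str.len p.2))) →
    (Ls.foldl
      (fun st L =>
        let alive := st.1.filter (fun p => decide (L ≤ PySem.Str.len p.2))
        let bucket := alive.foldl
          (fun bucket p => bucket.modify (PySem.Str.slice p.2 none (some L)) [] (· ++ [p.1]))
          (PySem.Dict.empty : PySem.Dict String (List Int))
        (alive, st.2 ++ [(L, bucket.items)]))
      (alive, acc)).2
      = acc ++ Ls.map (fun L => (L, (es.foldl (pvStep L) PySem.Dict.empty).items)) := by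
  intro Ls
  induction Ls with
  | nil => intro _ alive acc _; simp
  | cons L rest ih =>
    intro hp alive acc hfil
    simp only [List.foldl_cons]
    have habs : ∀ L' ∈ rest,
        (alive.filter (fun p => decide (L ≤ PySem.Str.len p.2))).filter
            (fun p => decide (L' ≤ PySem.Str.len p.2))
          = es.filter (fun p => decide (L' ≤ PySem.Str.len p.2)) := by
      intro L' hL'
      have hLL' : L ≤ L' := (List.pairwise_cons.1 hp).1 _ hL'
      have hpt : ∀ p ∈ alive, (decide (L' ≤ PySem.Str.len p.2) && decide (L ≤ PySem.Str.len p.2))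
          = decide (L' ≤ PySem.Str.len p.2) := by
        intro p _
        rcases hd : decide (L' ≤ PySem.Str.len p.2) with _ | _
        · simp
        · have hL2 : L ≤ PySem.Str.len p.2 := le_trans hLL' (of_decide_eq_true hd)
          simp
          simpa [PySem.Str.len_eq, String.length_toList] using hL2
      rw [List.filter_filter, List.filter_congr hpt, hfil L' (by simp [hL'])]
    have hbucket : ((alive.filter (fun p => decide (L ≤ PySem.Str.len p.2))).foldl
          (fun bucket p => bucket.modify (PySem.Str.slice p.2 none (some L)) [] (· ++ [p.1]))
          (PySem.Dict.empty : PySem.Dict String (List Int)))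
        = es.foldl (pvStep L) PySem.Dict.empty := by
      rw [hfil L (by simp), List.foldl_filter]
      have : (fun (x : PySem.Dict String (List Int)) (y : Int × String) =>
          if decide (L ≤ PySem.Str.len y.2) = true then
            x.modify (PySem.Str.slice y.2 none (some L)) [] (· ++ [y.1]) else x) = pvStep L := by
        funext b p
        simp [pvStep]
      rw [this]
    rw [hbucket, ih (List.pairwise_cons.1 hp).2 _ _ habs]
    simp

lemma pv_alt_eq (norms_ns : List String) (max_len : Int) :
    build_prefix_maps_py_alt norms_ns max_len
      = (PySem.List.pyRange 1 (max_len + 1)).map (fun L =>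
          (L, ((PySem.List.enumerate norms_ns 0).foldl (pvStep L) PySem.Dict.empty).items)) := by
  have hp := (PySem.List.pairwise_lt_pyRange_one 1 (max_len + 1)).imp le_of_lt
  have := pv_alt_loop (PySem.List.enumerate norms_ns 0) (PySem.List.pyRange 1 (max_len + 1)) hp
    (PySem.List.enumerate norms_ns 0) [] (fun _ _ => rfl)
  simpa [build_prefix_maps_py_alt] using this

-- one string's inner loop updates each still-pending length bucket by pvStep
lemma pv_innerA_items (i : Int) (s : String) :
    ∀ (Ls : List Int) (pre : List (Int × PySem.Dict String (List Int)))
      (g : Int → PySem.Dict String (List Int)) (maps : PySem.Dict Int (PySem.Dict String (List Int))),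
      maps.items = pre ++ Ls.map (fun L => (L, g L)) →
      (pre.map Prod.fst ++ Ls).Nodup →
      Ls.Pairwise (· < ·) →
      (pvInnerA i s Ls maps).items = pre ++ Ls.map (fun L => (L, pvStep L (g L) (i, s))) := by
  intro Ls
  induction Ls with
  | nil => intro pre g maps h _ _; simpa [pvInnerA] using h
  | cons L rest ih =>
    intro pre g maps h hnd hp
    by_cases hlt : PySem.Str.len s < L
    · -- break: no remaining length can be ≤ len s
      rw [pvInnerA, if_pos hlt, h]
      have hcg : ∀ L' ∈ L :: rest, (fun L' => (L', pvStep L' (g L') (i, s))) L'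
          = (fun L' => (L', g L')) L' := by
        intro L' hL'
        have hLle : L ≤ L' := by
          rcases List.mem_cons.1 hL' with rfl | hmem
          · exact le_refl _
          · exact le_of_lt ((List.pairwise_cons.1 hp).1 _ hmem)
        have hF : ¬ L' ≤ PySem.Str.len s := not_le.2 (lt_of_lt_of_le hlt hLle)
        simp only [pvStep, if_neg hF]
      rw [List.map_congr_left hcg]
    · -- update bucket L, recurse on rest
      obtain ⟨hnd1, hnd2, hdisj⟩ := List.nodup_append.1 hnd
      have hLnotpre : L ∉ pre.map Prod.fst := fun hm => hdisj L hm L (by simp) rfl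
      have hLnotrest : L ∉ rest := by simpa using (List.nodup_cons.1 hnd2).1
      have hkeys : maps.keys = pre.map Prod.fst ++ (L :: rest) := by
        show maps.items.map Prod.fst = _
        rw [h]; simp [Function.comp_def]
      have hknd : maps.keys.Nodup := by rw [hkeys]; exact hnd
      have hmem : (L, g L) ∈ maps.items := by rw [h]; simp
      have hget : maps.getD L PySem.Dict.empty = g L :=
        PySem.Dict.getD_of_mem_items maps hmem hknd _
      have hcont : maps.contains L = true := by
        rw [PySem.Dict.contains_iff_mem_keys, hkeys]; simp
      have hle : L ≤ PySem.Str.len s := not_lt.1 hlt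
      -- the updated bucket is pvStep L (g L) (i, s)
      have hm' : (match (maps.getD L PySem.Dict.empty).get? (PySem.Str.slice s none (some L)) with
          | none => (maps.getD L PySem.Dict.empty).insert (PySem.Str.slice s none (some L)) [i]
          | some b => (maps.getD L PySem.Dict.empty).insert (PySem.Str.slice s none (some L)) (b ++ [i]))
          = pvStep L (g L) (i, s) := by
        rw [hget]
        rcases hgb : (g L).get? (PySem.Str.slice s none (some L)) with _ | b
        · simp only [pvStep, if_pos hle, PySem.Dict.modify,
            PySem.Dict.getD_of_get?_eq_none _ _ hgb, List.nil_append]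
        · simp only [pvStep, if_pos hle, PySem.Dict.modify,
            PySem.Dict.getD_of_get?_eq_some _ _ hgb]
      have hins : (maps.insert L (pvStep L (g L) (i, s))).items
          = (pre ++ [(L, pvStep L (g L) (i, s))]) ++ rest.map (fun L' => (L', g L')) := by
        rw [PySem.Dict.items_insert_of_contains _ _ hcont, h]
        simp only [List.map_append, List.map_cons, List.map_map]
        have hpre : ∀ q ∈ pre,
            (fun p => if (p.1 == L) = true then (L, pvStep L (g L) (i, s)) else p) q = id q := by
          intro q hq
          have : q.1 ≠ L := fun he => hLnotpre (he ▸ List.mem_map_of_mem hq)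
          simp [this]
        have hrest : ∀ L' ∈ rest, ((fun p => if (p.1 == L) = true
              then (L, pvStep L (g L) (i, s)) else p) ∘ fun L' => (L', g L')) L'
            = (fun L' => (L', g L')) L' := by
          intro L' hL'
          have : L' ≠ L := fun he => hLnotrest (he ▸ hL')
          simp [this]
        rw [List.map_congr_left hpre, List.map_id, List.map_congr_left hrest]
        simp
      simp only [pvInnerA, if_neg hlt]
      rw [hm']
      rw [ih (pre ++ [(L, pvStep L (g L) (i, s))]) g (maps.insert L (pvStep L (g L) (i, s)))
        (by rw [hins]) (by simpa using hnd) (List.pairwise_cons.1 hp).2]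
      simp

-- the outer loop over enumerate(norms_ns) folds pvStep into every bucket
lemma pv_outer_items (Ls : List Int) (hp : Ls.Pairwise (· < ·)) (h1 : ∀ L ∈ Ls, 1 ≤ L) :
    ∀ (es : List (Int × String)) (g : Int → PySem.Dict String (List Int))
      (maps : PySem.Dict Int (PySem.Dict String (List Int))),
      maps.items = Ls.map (fun L => (L, g L)) →
      ((es.foldl (fun maps p => if p.2 = "" then maps else pvInnerA p.1 p.2 Ls maps) maps)).items
        = Ls.map (fun L => (L, es.foldl (pvStep L) (g L))) := by
  intro es
  induction es with
  | nil => intro g maps h; simpa using h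
  | cons p es ih =>
    intro g maps h
    simp only [List.foldl_cons]
    have hnext : (if p.2 = "" then maps else pvInnerA p.1 p.2 Ls maps).items
        = Ls.map (fun L => (L, pvStep L (g L) p)) := by
      by_cases hz : p.2 = ""
      · rw [if_pos hz, h]
        apply List.map_congr_left
        intro L hL
        have hF : ¬ L ≤ PySem.Str.len p.2 := by
          have h0 : PySem.Str.len "" = 0 := by decide
          have := h1 L hL
          rw [hz, h0]; omega
        simp only [pvStep, if_neg hF]
      · rw [if_neg hz]
        simpa using pv_innerA_items p.1 p.2 Ls [] g maps (by simpa using h)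
          (by simpa using hp.nodup) hp
    exact ih (fun L => pvStep L (g L) p) _ hnext

lemma pv_init_items (Ls : List Int) (hnd : Ls.Nodup) :
    (Ls.foldl (fun d L => d.insert L (PySem.Dict.empty : PySem.Dict String (List Int)))
        PySem.Dict.empty).items
      = Ls.map (fun L => (L, PySem.Dict.empty)) := by
  simpa using PySem.Dict.items_foldl_insert_fresh Ls id (fun _ => PySem.Dict.empty)
    PySem.Dict.empty (by simp) (by simpa using hnd)

-- ===== VERDICT (by name: the statement is the Claim_ definition above) =====
theorem build_prefix_maps_py_spec : Claim_equal_build_prefix_maps_py := by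
  intro norms_ns max_len _
  show build_prefix_maps_py norms_ns max_len = build_prefix_maps_py_alt norms_ns max_len
  rw [pv_alt_eq, build_prefix_maps_py]
  have hp := PySem.List.pairwise_lt_pyRange_one 1 (max_len + 1)
  have h1 : ∀ L ∈ PySem.List.pyRange 1 (max_len + 1), 1 ≤ L := fun L hL =>
    (PySem.List.mem_pyRange_one.1 hL).1
  rw [pv_outer_items _ hp h1 (PySem.List.enumerate norms_ns 0) (fun _ => PySem.Dict.empty) _
      (pv_init_items _ hp.nodup)]
  rw [List.map_map]
  rfl
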